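-- pv_equiv track=rewrite | github.com/querypie/querypie-docs | confluence-mdx/bin/reverse_sync/fragment_extractor.py | _find_tag_close_gt
-- ===== SOURCE A (Python) =====
-- def _find_tag_close_gt(text: str, start: int) -> int:
--     """Opening tag의 닫는 ``>`` 위치를 찾는다.
--
--     따옴표(``"`` / ``'``) 안의 ``>``는 건너뛴다.
--     """
--     in_quote = None
--     for i in range(start, len(text)):
--         c = text[i]
--         if in_quote:
--             if c == in_quote:
--                 in_quote = None
--         elif c in ('"', "'"):
--             in_quote = c
--         elif c == ">":
--             return i
--     return -1
-- ===== SOURCE B (Python) =====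
-- def _min_found(a: int, b: int) -> int:
--     """Minimum of two str.find results, ignoring -1 (no match)."""
--     if a == -1:
--         return b
--     if b == -1:
--         return a
--     return a if a < b else b
--
--
-- def _find_tag_close_gt(text: str, start: int) -> int:
--     n = len(text)
--     i = start
--     while i < n:
--         best = _min_found(_min_found(text.find('"', i), text.find("'", i)),
--                           text.find('>', i))
--         if best == -1:
--             return -1
--         ch = text[best]
--         if ch == '>':
--             return best
--         close = text.find(ch, best + 1)
--         if close == -1:
--             return -1
--         i = close + 1
--     return -1
-- ===== Notes on version B (the rewrite author's own statement) =====
-- stated objective: idiomatic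
-- what changed: Replaces A's per-character state-machine scan (in_quote flag updated at every index) by a jump loop that uses str.find to leap directly to the earliest of '"', "'", '>' and, for a quote, to its matching closing quote, so no quote-state is maintained.
-- outside the precondition, e.g. on _find_tag_close_gt('ab>', -1): A returns -1, B returns 2
import Mathlib
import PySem

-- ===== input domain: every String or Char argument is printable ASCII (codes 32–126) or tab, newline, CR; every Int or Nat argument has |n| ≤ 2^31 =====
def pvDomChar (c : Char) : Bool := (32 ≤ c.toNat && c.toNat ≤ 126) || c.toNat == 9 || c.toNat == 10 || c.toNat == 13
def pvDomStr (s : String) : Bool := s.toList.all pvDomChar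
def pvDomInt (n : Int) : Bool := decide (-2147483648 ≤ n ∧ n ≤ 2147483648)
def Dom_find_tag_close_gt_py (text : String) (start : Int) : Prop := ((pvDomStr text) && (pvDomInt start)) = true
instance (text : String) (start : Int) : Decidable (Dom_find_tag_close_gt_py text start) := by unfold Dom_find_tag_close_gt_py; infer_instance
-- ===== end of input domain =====

-- B replaces A's per-character in_quote state machine by an idiomatic jump loop:
-- str.find leaps to the earliest of '"', '\'', '>' and, for a quote, to its matching
-- closing quote, so no quote-state is maintained.

-- ===== PORT A =====
-- for i in range(start, len(text)) with the in_quote state; under Pre_ (0 ≤ start)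
-- this is a scan of the suffix text[start:] carrying the absolute index i.
def loopA (i : Nat) (inq : Option Char) : List Char → Int
  | [] => -1
  | c :: rest =>
    match inq with
    | some q => if c = q then loopA (i+1) none rest else loopA (i+1) (some q) rest
    | none =>
      if c = '"' ∨ c = '\'' then loopA (i+1) (some c) rest
      else if c = '>' then (i : Int)
      else loopA (i+1) none rest

def find_tag_close_gt_py (text : String) (start : Int) : Int :=
  if start < 0 then -1 else loopA start.toNat none (text.toList.drop start.toNat)

-- ===== PORT B =====
-- text.find(q, i) for 0 ≤ i: first index ≥ i holding q, else -1
def findAux (q : Char) (i : Nat) : List Char → Int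
  | [] => -1
  | c :: rest => if c = q then (i : Int) else findAux q (i+1) rest

def findFrom (cs : List Char) (q : Char) (i : Nat) : Int := findAux q i (cs.drop i)

-- _min_found from Source B
def minFound (a b : Int) : Int :=
  if a = -1 then b else if b = -1 then a else if a < b then a else b

-- the while loop of Source B; fuel only makes the recursion structural (never exhausted when fuel ≥ n)
def loopB (cs : List Char) : Nat → Nat → Int
  | 0, _ => -1
  | fuel+1, i =>
    if i < cs.length then
      let best := minFound (minFound (findFrom cs '"' i) (findFrom cs '\'' i)) (findFrom cs '>' i)
      if best = -1 then -1
      else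
        let ch := (cs[best.toNat]?).getD ' '
        if ch = '>' then best
        else
          let close := findFrom cs ch (best.toNat + 1)
          if close = -1 then -1 else loopB cs fuel (close.toNat + 1)
    else -1

def find_tag_close_gt_py_alt (text : String) (start : Int) : Int :=
  if start < 0 then -1 else loopB text.toList (text.toList.length + 1) start.toNat

-- ===== PRECONDITION & SPEC =====
-- Pre_ excludes negative start, a corner no caller of this internal helper uses: there A
-- raises IndexError (start < -len) or scans via Python's accidental negative-index
-- wraparound (possibly returning the ambiguous -1 for a found '>'), while B's str.find
-- clamps the start like a slice; neither behaviour is specified.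
def Pre_find_tag_close_gt_py (text : String) (start : Int) : Prop := 0 ≤ start
instance (text : String) (start : Int) : Decidable (Pre_find_tag_close_gt_py text start) := by
  unfold Pre_find_tag_close_gt_py; infer_instance

def pvWitness_find_tag_close_gt_py : String × Int := ("<a b=\"c>\">x", 0)

def Spec_find_tag_close_gt_py (text : String) (start : Int) (out : Int) : Prop := out = find_tag_close_gt_py_alt text start
instance (text : String) (start : Int) (out : Int) : Decidable (Spec_find_tag_close_gt_py text start out) := by unfold Spec_find_tag_close_gt_py; infer_instance

-- ===== CLAIM (what is proved, stated in full; the proofs are below) =====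
def Claim_equal_find_tag_close_gt_py : Prop := ∀ (text : String) (start : Int), Dom_find_tag_close_gt_py text start → Pre_find_tag_close_gt_py text start → Spec_find_tag_close_gt_py text start (find_tag_close_gt_py text start)

-- ===== LEMMAS AND PROOFS =====

def isSpec (c : Char) : Bool := c == '"' || c == '\'' || c == '>'

-- every list either satisfies "all p-false" or splits at the first p-true element
theorem decomp_first (p : Char → Bool) : ∀ s : List Char,
    (∀ c ∈ s, p c = false) ∨
    ∃ t c u, s = t ++ c :: u ∧ (∀ x ∈ t, p x = false) ∧ p c = true := by
  intro s
  induction s with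
  | nil => exact Or.inl (by simp)
  | cons a s ih =>
    by_cases ha : p a = true
    · exact Or.inr ⟨[], a, s, by simp, by simp, ha⟩
    · rcases ih with h | ⟨t, c, u, rfl, ht, hc⟩
      · exact Or.inl (by simpa [ha] using h)
      · exact Or.inr ⟨a :: t, c, u, rfl, by simpa [ha] using ht, hc⟩

theorem findAux_ge (q : Char) : ∀ (s : List Char) (i : Nat),
    findAux q i s = -1 ∨ (i : Int) ≤ findAux q i s := by
  intro s
  induction s with
  | nil => intro i; exact Or.inl rfl
  | cons c rest ih =>
    intro i
    by_cases h : c = q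
    · simp [findAux, h]
    · rcases ih (i+1) with h1 | h1
      · exact Or.inl (by simp [findAux, h, h1])
      · refine Or.inr ?_
        simp only [findAux, if_neg h]
        omega

theorem findAux_none (q : Char) : ∀ (s : List Char) (i : Nat),
    (∀ c ∈ s, c ≠ q) → findAux q i s = -1 := by
  intro s
  induction s with
  | nil => intro i _; rfl
  | cons c rest ih =>
    intro i h
    have hc : c ≠ q := h c (by simp)
    simp only [findAux, if_neg hc]
    exact ih (i+1) (fun x hx => h x (by simp [hx]))

theorem findAux_append (q : Char) : ∀ (t : List Char) (rest : List Char) (i : Nat),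
    (∀ c ∈ t, c ≠ q) → findAux q i (t ++ rest) = findAux q (i + t.length) rest := by
  intro t
  induction t with
  | nil => intro rest i _; simp
  | cons c t ih =>
    intro rest i h
    have hc : c ≠ q := h c (by simp)
    simp only [List.cons_append, findAux, if_neg hc]
    rw [ih rest (i+1) (fun x hx => h x (by simp [hx]))]
    congr 1
    simp; omega

theorem loopA_skip_none : ∀ (t : List Char) (rest : List Char) (i : Nat),
    (∀ c ∈ t, isSpec c = false) →
    loopA i none (t ++ rest) = loopA (i + t.length) none rest := by
  intro t
  induction t with
  | nil => intro rest i _; simp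
  | cons c t ih =>
    intro rest i h
    have hc : isSpec c = false := h c (by simp)
    have h1 : ¬ (c = '"' ∨ c = '\'') := by
      intro hor; rcases hor with h' | h' <;> simp [isSpec, h'] at hc
    have h2 : c ≠ '>' := by intro h'; simp [isSpec, h'] at hc
    simp only [List.cons_append, loopA, if_neg h1, if_neg h2]
    rw [ih rest (i+1) (fun x hx => h x (by simp [hx]))]
    congr 1
    simp; omega

theorem loopA_none_of_all : ∀ (s : List Char) (i : Nat),
    (∀ c ∈ s, isSpec c = false) → loopA i none s = -1 := by
  intro s i h
  have := loopA_skip_none s [] i h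
  simpa [loopA] using this

theorem loopA_skip_some (q : Char) : ∀ (t : List Char) (rest : List Char) (i : Nat),
    (∀ c ∈ t, c ≠ q) →
    loopA i (some q) (t ++ rest) = loopA (i + t.length) (some q) rest := by
  intro t
  induction t with
  | nil => intro rest i _; simp
  | cons c t ih =>
    intro rest i h
    have hc : c ≠ q := h c (by simp)
    simp only [List.cons_append, loopA, if_neg hc]
    rw [ih rest (i+1) (fun x hx => h x (by simp [hx]))]
    congr 1
    simp; omega

theorem loopA_some_of_all (q : Char) : ∀ (s : List Char) (i : Nat),
    (∀ c ∈ s, c ≠ q) → loopA i (some q) s = -1 := by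
  intro s i h
  have := loopA_skip_some q s [] i h
  simpa [loopA] using this

theorem mf1 (b x y : Int) (hb : 0 ≤ b) (hx : x = -1 ∨ b + 1 ≤ x) (hy : y = -1 ∨ b + 1 ≤ y) :
    minFound (minFound b x) y = b := by
  unfold minFound; split_ifs <;> omega

theorem mf2 (b x y : Int) (hb : 0 ≤ b) (hx : x = -1 ∨ b + 1 ≤ x) (hy : y = -1 ∨ b + 1 ≤ y) :
    minFound (minFound x b) y = b := by
  unfold minFound; split_ifs <;> omega

theorem mf3 (b x y : Int) (hb : 0 ≤ b) (hx : x = -1 ∨ b + 1 ≤ x) (hy : y = -1 ∨ b + 1 ≤ y) :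
    minFound (minFound x y) b = b := by
  unfold minFound; split_ifs <;> omega

-- the earliest of the three finds is the first special character
theorem best_val (b : Nat) (c : Char) (u : List Char) (hc : isSpec c = true) :
    minFound (minFound (findAux '"' b (c :: u)) (findAux '\'' b (c :: u))) (findAux '>' b (c :: u))
      = (b : Int) := by
  have hd := findAux_ge '"' u (b+1)
  have hs := findAux_ge '\'' u (b+1)
  have hg := findAux_ge '>' u (b+1)
  simp only [isSpec, Bool.or_eq_true, beq_iff_eq] at hc
  have hd' : findAux '"' (b+1) u = -1 ∨ (b : Int) + 1 ≤ findAux '"' (b+1) u := by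
    rcases hd with h | h
    · exact Or.inl h
    · right; push_cast at h; exact h
  have hs' : findAux '\'' (b+1) u = -1 ∨ (b : Int) + 1 ≤ findAux '\'' (b+1) u := by
    rcases hs with h | h
    · exact Or.inl h
    · right; push_cast at h; exact h
  have hg' : findAux '>' (b+1) u = -1 ∨ (b : Int) + 1 ≤ findAux '>' (b+1) u := by
    rcases hg with h | h
    · exact Or.inl h
    · right; push_cast at h; exact h
  rcases hc with (hc | hc) | hc <;> subst hc <;>
    simp only [findAux, if_neg (by decide : ¬ ('"':Char) = '\''),
      if_neg (by decide : ¬ ('"':Char) = '>'), if_neg (by decide : ¬ ('\'':Char) = '"'),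
      if_neg (by decide : ¬ ('\'':Char) = '>'), if_neg (by decide : ¬ ('>':Char) = '"'),
      if_neg (by decide : ¬ ('>':Char) = '\'')]
  · exact mf1 (b:Int) _ _ (Int.natCast_nonneg b) hs' hg'
  · exact mf2 (b:Int) _ _ (Int.natCast_nonneg b) hd' hg'
  · exact mf3 (b:Int) _ _ (Int.natCast_nonneg b) hd' hs'

theorem main_eq (cs : List Char) : ∀ (fuel i : Nat), cs.length ≤ i + fuel →
    loopB cs fuel i = loopA i none (cs.drop i) := by
  intro fuel
  induction fuel with
  | zero =>
    intro i h
    have : cs.drop i = [] := List.drop_eq_nil_of_le (by omega)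
    simp [loopB, this, loopA]
  | succ fuel ih =>
    intro i h
    by_cases hi : i < cs.length
    · rcases decomp_first isSpec (cs.drop i) with hall | ⟨t, c, u, hsplit, ht, hc⟩
      · -- no special char in the suffix: every find is -1
        have hnone : ∀ q : Char, isSpec q = true → findFrom cs q i = -1 := by
          intro q hq
          refine findAux_none q (cs.drop i) i (fun x hx hxq => ?_)
          subst hxq; rw [hall x hx] at hq; cases hq
        simp only [loopB, if_pos hi, hnone '"' (by decide), hnone '\'' (by decide),
          hnone '>' (by decide)]
        rw [loopA_none_of_all (cs.drop i) i hall]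
        simp [minFound]
      · -- suffix = t ++ c :: u with c the first special char
        have hfind : ∀ q : Char, isSpec q = true →
            findFrom cs q i = findAux q (i + t.length) (c :: u) := by
          intro q hq
          unfold findFrom
          rw [hsplit]
          exact findAux_append q t (c :: u) i (fun x hx hxq => by
            subst hxq; rw [ht x hx] at hq; cases hq)
        have hbest : minFound (minFound (findFrom cs '"' i) (findFrom cs '\'' i)) (findFrom cs '>' i)
            = ((i + t.length : Nat) : Int) := by
          rw [hfind '"' (by decide), hfind '\'' (by decide), hfind '>' (by decide)]
          exact best_val (i + t.length) c u hc
        have hlen3 : cs.length = i + (t.length + 1 + u.length) := by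
          have := congrArg List.length hsplit
          simp [List.length_drop] at this
          omega
        have hlen : i + t.length < cs.length := by omega
        have hget : cs[(i + t.length)]? = some c := by
          have h1 : (cs.drop i)[t.length]? = cs[i + t.length]? := by
            rw [List.getElem?_drop]
          rw [← h1, hsplit]
          rw [List.getElem?_append_right (by omega)]
          simp
        have hdropc : cs.drop (i + t.length + 1) = u := by
          have : cs.drop (i + t.length + 1) = (cs.drop i).drop (t.length + 1) := by
            rw [List.drop_drop]; congr 1
          rw [this, hsplit]
          have : t ++ c :: u = (t ++ [c]) ++ u := by simp
          rw [this]
          have hl : (t ++ [c]).length = t.length + 1 := by simp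
          rw [← hl, List.drop_left]
        have hbestne : ¬ ((i + t.length : Nat) : Int) = -1 := by omega
        have hAside : loopA i none (cs.drop i) = loopA (i + t.length) none (c :: u) := by
          rw [hsplit]; exact loopA_skip_none t (c :: u) i ht
        simp only [loopB, if_pos hi, hbest, if_neg hbestne, Int.toNat_natCast, hget,
          Option.getD_some]
        by_cases hgt : c = '>'
        · subst hgt
          rw [hAside]
          simp [loopA]
        · -- c is a quote
          have hquote : c = '"' ∨ c = '\'' := by
            simp only [isSpec, Bool.or_eq_true, beq_iff_eq] at hc
            rcases hc with (h' | h') | h'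
            · exact Or.inl h'
            · exact Or.inr h'
            · exact absurd h' hgt
          have hAside2 : loopA (i + t.length) none (c :: u) = loopA (i + t.length + 1) (some c) u := by
            simp [loopA, if_pos hquote]
          rw [hAside, hAside2]
          simp only [if_neg hgt]
          have hclose : findFrom cs c (i + t.length + 1) = findAux c (i + t.length + 1) u := by
            unfold findFrom; rw [hdropc]
          rcases decomp_first (fun x => x == c) u with hallu | ⟨v, d, w, husplit, hv, hd⟩
          · have hu : ∀ x ∈ u, x ≠ c := by
              intro x hx hxc; have := hallu x hx; simp [hxc] at this
            rw [hclose, findAux_none c u _ hu, loopA_some_of_all c u _ hu]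
            simp
          · have hdc : d = c := by simpa using hd
            subst hdc
            have hvne : ∀ x ∈ v, x ≠ d := by
              intro x hx hxc; have := hv x hx; simp [hxc] at this
            have hcval : findFrom cs d (i + t.length + 1)
                = ((i + t.length + 1 + v.length : Nat) : Int) := by
              rw [hclose, husplit, findAux_append d v (d :: w) _ hvne]
              simp [findAux]
            have hcne : ¬ ((i + t.length + 1 + v.length : Nat) : Int) = -1 := by omega
            have huv : u.length = v.length + (1 + w.length) := by
              rw [husplit]; simp; omega
            rw [hcval]
            simp only [if_neg hcne, Int.toNat_natCast]
            rw [ih (i + t.length + 1 + v.length + 1) (by omega)]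
            have hdropw : cs.drop (i + t.length + 1 + v.length + 1) = w := by
              have : cs.drop (i + t.length + 1 + v.length + 1) = (cs.drop (i + t.length + 1)).drop (v.length + 1) := by
                rw [List.drop_drop]; congr 1
              rw [this, hdropc, husplit]
              have : v ++ d :: w = (v ++ [d]) ++ w := by simp
              rw [this]
              have hl : (v ++ [d]).length = v.length + 1 := by simp
              rw [← hl, List.drop_left]
            rw [hdropw, husplit, loopA_skip_some d v (d :: w) _ hvne]
            simp [loopA]
    · have : cs.drop i = [] := List.drop_eq_nil_of_le (by omega)
      simp [loopB, if_neg hi, this, loopA]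

-- ===== VERDICT (by name: the statement is the Claim_ definition above) =====
theorem find_tag_close_gt_py_spec : Claim_equal_find_tag_close_gt_py := by
  intro text start _ hpre
  unfold Spec_find_tag_close_gt_py find_tag_close_gt_py find_tag_close_gt_py_alt
  have hns : ¬ start < 0 := by exact not_lt.mpr hpre
  rw [if_neg hns, if_neg hns, main_eq text.toList (text.toList.length + 1) start.toNat (by omega)]
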